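-- pv_equiv track=rewrite | github.com/jm-kor-00/BaekjoonStudy | HW/boyer_moore.py | create_good_suffix_table
-- ===== SOURCE A (Python) =====
-- def create_good_suffix_table(pattern):
--     m = len(pattern)
--     table = {}
--     suffixes = get_suffixes(pattern)
--     for i in range(m - 1):
--         suffix = suffixes[i]
--         for j in range(1, len(suffix) + 1):
--             if suffix[-j] not in table:
--                 table[suffix[-j]] = j
--     for char in pattern:
--         if char not in table:
--             table[char] = m
--     return table
--
-- def get_suffixes(pattern):
--     m = len(pattern)
--     suffixes = []
--     for i in range(m - 1):
--         suffixes.append(pattern[i + 1:])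
--     return suffixes
-- ===== SOURCE B (Python) =====
-- def create_good_suffix_table(pattern):
--     # One reverse pass over pattern[1:]: the j-th char from the end (first time
--     # seen) gets distance j; then pattern[0] gets m if it never appeared later.
--     m = len(pattern)
--     table = {}
--     for j, ch in enumerate(reversed(pattern[1:]), 1):
--         if ch not in table:
--             table[ch] = j
--     if m and pattern[0] not in table:
--         table[pattern[0]] = m
--     return table
-- ===== Notes on version B (the rewrite author's own statement) =====
-- stated objective: faster
-- what changed: Replaced the quadratic build-all-suffixes-and-rescan loops with a single reverse pass over pattern[1:] recording the smallest end-distance per character (plus one check for pattern[0]).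
import Mathlib
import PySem

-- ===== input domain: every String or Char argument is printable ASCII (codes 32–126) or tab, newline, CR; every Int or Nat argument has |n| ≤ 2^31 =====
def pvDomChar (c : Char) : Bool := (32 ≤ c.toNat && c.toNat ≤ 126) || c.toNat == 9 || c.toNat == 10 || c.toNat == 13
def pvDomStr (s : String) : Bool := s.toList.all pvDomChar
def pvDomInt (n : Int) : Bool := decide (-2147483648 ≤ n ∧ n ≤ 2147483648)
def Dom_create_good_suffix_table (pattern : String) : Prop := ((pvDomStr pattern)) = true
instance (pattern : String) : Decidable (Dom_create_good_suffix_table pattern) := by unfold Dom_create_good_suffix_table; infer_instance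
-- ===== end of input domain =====

-- B replaces A's quadratic all-suffixes rescan by one reverse pass over pattern[1:]
-- (smallest end-distance per char) plus one check for pattern[0]; same table, O(m).


-- ===== PORT A =====
-- helper get_suffixes(pattern): list of pattern[i+1:] for i in range(m-1)
def get_suffixes (cs : List Char) : List (List Char) :=
  (PySem.List.pyRange 0 ((cs.length : Int) - 1)).foldl
    (fun acc i => acc ++ [PySem.List.slice cs (some (i + 1)) none]) []

def create_good_suffix_table (pattern : String) : List (String × Int) :=
  let cs := pattern.toList
  let m : Int := (cs.length : Int)
  let suffixes := get_suffixes cs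
  let table : PySem.Dict Char Int :=
    (PySem.List.pyRange 0 (m - 1)).foldl
      (fun d i =>
        let suffix := PySem.List.pyGetD suffixes i []   -- suffixes[i], always in range
        (PySem.List.pyRange 1 ((suffix.length : Int) + 1)).foldl
          (fun d j =>
            match PySem.List.pyGet? suffix (-j) with    -- suffix[-j], always in range
            | some c => if d.contains c then d else d.insert c j
            | none => d)
          d)
      PySem.Dict.empty
  let table := cs.foldl (fun d c => if d.contains c then d else d.insert c m) table
  table.items.map (fun p => (String.ofList [p.1], p.2))     -- one-char Python str keys → String

-- ===== PORT B =====
def create_good_suffix_table_alt (pattern : String) : List (String × Int) :=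
  let cs := pattern.toList
  let m : Int := (cs.length : Int)
  let table : PySem.Dict Char Int :=
    ((PySem.List.slice cs (some 1) none).reverse.zipIdx 1).foldl   -- enumerate(reversed(pattern[1:]), 1)
      (fun d p => if d.contains p.1 then d else d.insert p.1 (p.2 : Int)) PySem.Dict.empty
  let table :=
    match cs with
    | [] => table
    | c :: _ => if table.contains c then table else table.insert c m
  table.items.map (fun p => (String.ofList [p.1], p.2))     -- one-char Python str keys → String

-- ===== PRECONDITION & SPEC =====
def Spec_create_good_suffix_table (pattern : String) (out : List (String × Int)) : Prop := out = create_good_suffix_table_alt pattern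
instance (pattern : String) (out : List (String × Int)) : Decidable (Spec_create_good_suffix_table pattern out) := by unfold Spec_create_good_suffix_table; infer_instance

-- ===== CLAIM (what is proved, stated in full; the proofs are below) =====
def Claim_equal_create_good_suffix_table : Prop := ∀ (pattern : String), Dom_create_good_suffix_table pattern → Spec_create_good_suffix_table pattern (create_good_suffix_table pattern)

-- ===== LEMMAS AND PROOFS =====

-- proof-side canonical form: insert-if-absent over (char, end-distance) pairs
def sfold (d : PySem.Dict Char Int) (l : List (Char × Nat)) : PySem.Dict Char Int :=
  l.foldl (fun d p => if d.contains p.1 then d else d.insert p.1 ((p.2 : Int))) d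

theorem sfold_cons (d : PySem.Dict Char Int) (p : Char × Nat) (l : List (Char × Nat)) :
    sfold d (p :: l) = sfold (if d.contains p.1 then d else d.insert p.1 ((p.2 : Int))) l := rfl

theorem sfold_nil (d : PySem.Dict Char Int) : sfold d [] = d := rfl

theorem sfold_append (d : PySem.Dict Char Int) (l₁ l₂ : List (Char × Nat)) :
    sfold d (l₁ ++ l₂) = sfold (sfold d l₁) l₂ := List.foldl_append

theorem contains_step (d : PySem.Dict Char Int) (c x : Char) (v : Int)
    (h : d.contains x = true) :
    (if d.contains c then d else d.insert c v).contains x = true := by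
  split_ifs with hc
  · exact h
  · simp [PySem.Dict.contains_insert, h]

theorem sfold_contains_of (l : List (Char × Nat)) (d : PySem.Dict Char Int) (x : Char)
    (h : d.contains x = true) : (sfold d l).contains x = true := by
  induction l generalizing d with
  | nil => exact h
  | cons p l ih => rw [sfold_cons]; exact ih _ (contains_step d p.1 x _ h)

theorem sfold_contains_mem (l : List (Char × Nat)) (d : PySem.Dict Char Int) (p : Char × Nat)
    (hp : p ∈ l) : (sfold d l).contains p.1 = true := by
  induction l generalizing d with
  | nil => cases hp
  | cons q l ih =>
    rw [sfold_cons]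
    rcases List.mem_cons.mp hp with rfl | hp'
    · refine sfold_contains_of l _ _ ?_
      split_ifs with hc
      · exact hc
      · simp
    · exact ih _ hp'

theorem sfold_noop (l : List (Char × Nat)) (d : PySem.Dict Char Int)
    (h : ∀ p ∈ l, d.contains p.1 = true) : sfold d l = d := by
  induction l with
  | nil => rfl
  | cons p l ih =>
    rw [sfold_cons, if_pos (h p (List.mem_cons_self ..))]
    exact ih fun q hq => h q (List.mem_cons_of_mem _ hq)

theorem pyGet_neg (s : List Char) (k : Nat) (h : k < s.length) :
    PySem.List.pyGet? s (-((k : Int) + 1)) = some (s.reverse[k]'(by simpa using h)) := by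
  have h1 : ¬((k : Int) ≤ -1) := by omega
  have h2 : s.length - (k + 1) = s.length - 1 - k := by omega
  simp [PySem.List.pyGet?, PySem.List.pyIdx?, h1, h, h2]

theorem innerA_aux (s : List Char) (n : Nat) (hn : n ≤ s.length) (d : PySem.Dict Char Int) :
    (PySem.List.pyRange 1 ((n : Int) + 1)).foldl
      (fun d j =>
        match PySem.List.pyGet? s (-j) with
        | some c => if d.contains c then d else d.insert c j
        | none => d) d
    = sfold d ((s.reverse.take n).zipIdx 1) := by
  induction n generalizing d with
  | zero => rfl
  | succ n ih =>
    have hcast : ((n + 1 : Nat) : Int) + 1 = ((n : Int) + 1) + 1 := by push_cast; ring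
    rw [hcast, PySem.List.pyRange_one_succ_right (by omega), List.foldl_append,
      ih (by omega)]
    have hn' : n < s.length := by omega
    have hrev : n < s.reverse.length := by simpa using hn'
    have htake : s.reverse.take (n + 1) = s.reverse.take n ++ [s.reverse[n]] := by
      rw [List.take_add_one]
      simp [List.getElem?_eq_getElem hrev]
    have hlen : (s.reverse.take n).length = n := by rw [List.length_take]; omega
    rw [htake, List.zipIdx_append, sfold_append, hlen]
    simp only [List.zipIdx_cons, List.zipIdx_nil, sfold_cons, sfold_nil,
      List.foldl_cons, List.foldl_nil, pyGet_neg s n hn']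
    have hv : ((1 + n : Nat) : Int) = (n : Int) + 1 := by push_cast; ring
    rw [hv]

theorem innerA_eq (s : List Char) (d : PySem.Dict Char Int) :
    (PySem.List.pyRange 1 ((s.length : Int) + 1)).foldl
      (fun d j =>
        match PySem.List.pyGet? s (-j) with
        | some c => if d.contains c then d else d.insert c j
        | none => d) d
    = sfold d (s.reverse.zipIdx 1) := by
  have h := innerA_aux s s.length le_rfl d
  rwa [List.take_of_length_le (by simp)] at h

theorem contains_of_mem (t : List Char) (d : PySem.Dict Char Int) (c : Char) (hc : c ∈ t) :
    (sfold d (t.reverse.zipIdx 1)).contains c = true := by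
  have h : c ∈ (t.reverse.zipIdx 1).map Prod.fst := by
    rw [List.zipIdx_map_fst]; simpa using hc
  obtain ⟨p, hp, hpc⟩ := List.mem_map.mp h
  exact hpc ▸ sfold_contains_mem _ d p hp

theorem noop_fold (t : List Char) (ks : List Nat) (f : Nat → List Char)
    (hf : ∀ k c, c ∈ f k → c ∈ t) (d : PySem.Dict Char Int)
    (h : ∀ c ∈ t, d.contains c = true) :
    ks.foldl (fun d k => sfold d ((f k).reverse.zipIdx 1)) d = d := by
  induction ks with
  | nil => rfl
  | cons k ks ih =>
    rw [List.foldl_cons, sfold_noop, ih]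
    intro p hp
    exact h p.1 (hf k p.1 (List.mem_reverse.mp (List.fst_mem_of_mem_zipIdx hp)))

theorem outer_eq (t : List Char) :
    (List.range t.length).foldl
      (fun d k => sfold d (((t.drop k).reverse.zipIdx 1))) PySem.Dict.empty
    = sfold PySem.Dict.empty (t.reverse.zipIdx 1) := by
  cases t with
  | nil => rfl
  | cons c t' =>
    rw [List.length_cons, List.range_succ_eq_map, List.foldl_cons, List.foldl_map]
    show (List.range t'.length).foldl
        (fun d k => sfold d ((((c :: t').drop (Nat.succ k)).reverse.zipIdx 1)))
        (sfold PySem.Dict.empty (((c :: t').drop 0).reverse.zipIdx 1)) = _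
    rw [List.drop_zero]
    exact noop_fold (c :: t') _ _ (fun k x hx => List.mem_of_mem_drop hx) _
      (fun x hx => contains_of_mem _ _ x hx)

theorem noop_chars (l : List Char) (v : Int) (d : PySem.Dict Char Int)
    (h : ∀ c ∈ l, d.contains c = true) :
    l.foldl (fun d c => if d.contains c then d else d.insert c v) d = d := by
  induction l with
  | nil => rfl
  | cons c l ih =>
    rw [List.foldl_cons, if_pos (h c (List.mem_cons_self ..))]
    exact ih fun x hx => h x (List.mem_cons_of_mem _ hx)

theorem get_suffixes_eq (c0 : Char) (t : List Char) :
    get_suffixes (c0 :: t)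
      = (List.range t.length).map (fun k => (c0 :: t).drop (k + 1)) := by
  unfold get_suffixes
  rw [PySem.List.foldl_append_singleton_eq_map]
  have hm : (((c0 :: t).length : Int)) - 1 = ((t.length : Nat) : Int) := by simp
  rw [hm, PySem.List.pyRange_zero_natCast, List.map_map]
  refine List.map_congr_left fun k hk => ?_
  show PySem.List.slice (c0 :: t) (some ((k : Int) + 1)) none = (c0 :: t).drop (k + 1)
  have hc : ((k : Int) + 1) = ((k + 1 : Nat) : Int) := by push_cast; ring
  rw [hc, PySem.List.slice_from _ (by positivity)]
  simp

-- ===== VERDICT (by name: the statement is the Claim_ definition above) =====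
theorem create_good_suffix_table_spec : Claim_equal_create_good_suffix_table := by
  intro pattern _
  unfold Spec_create_good_suffix_table
  unfold create_good_suffix_table create_good_suffix_table_alt
  generalize pattern.toList = cs
  cases cs with
  | nil => rfl
  | cons c0 t =>
    simp only []
    have hm : ((c0 :: t).length : Int) - 1 = ((t.length : Nat) : Int) := by simp
    rw [hm, PySem.List.pyRange_zero_natCast]
    simp only [List.foldl_map]
    have hbody : ∀ (d : PySem.Dict Char Int), ∀ k ∈ List.range t.length,
        (PySem.List.pyRange 1
            (((PySem.List.pyGetD (get_suffixes (c0 :: t)) ((k : Int)) []).length : Int) + 1)).foldl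
          (fun d j =>
            match PySem.List.pyGet? (PySem.List.pyGetD (get_suffixes (c0 :: t)) ((k : Int)) []) (-j) with
            | some c => if d.contains c then d else d.insert c j
            | none => d) d
        = sfold d ((t.drop k).reverse.zipIdx 1) := by
      intro d k hk
      have hk' : k < t.length := List.mem_range.mp hk
      have hget : PySem.List.pyGetD (get_suffixes (c0 :: t)) ((k : Int)) [] = t.drop k := by
        rw [get_suffixes_eq, PySem.List.pyGetD_natCast, List.getD_eq_getElem?_getD]
        simp [hk', List.drop_succ_cons]
      rw [hget]
      exact innerA_eq (t.drop k) d
    rw [PySem.List.foldl_congr_mem _ _ _ _ hbody, outer_eq]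
    have hslice : PySem.List.slice (c0 :: t) (some 1) = t := by
      rw [PySem.List.slice_from _ (by norm_num)]; rfl
    rw [hslice, List.foldl_cons]
    rw [noop_chars t _ _ (fun c hc => contains_step _ _ _ _ (contains_of_mem t _ c hc))]
    rfl
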